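-- pv_equiv track=rewrite | github.com/Saqlain143/Advent-of-Code | 2024/Day-10/Day-10.py | bfs
-- ===== SOURCE A (Python) =====
-- from collections import deque
--
-- def is_valid_move(x, y, rows, cols):
--     """Checks if a move is within the bounds of the grid."""
--     return 0 <= x < rows and 0 <= y < cols
--
-- def bfs(start_x, start_y, grid):
--     """Performs BFS to count how many 9s are reachable from a given trailhead."""
--     rows, cols = len(grid), len(grid[0])
--     visited = [[False] * cols for _ in range(rows)]
--     queue = deque([(start_x, start_y)])
--     visited[start_x][start_y] = True
--     reachable_9s = 0
--
--     directions = [(-1, 0), (1, 0), (0, -1), (0, 1)]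
--
--     while queue:
--         x, y = queue.popleft()
--
--         if grid[x][y] == 9:
--             reachable_9s += 1
--
--         for dx, dy in directions:
--             nx, ny = x + dx, y + dy
--             if is_valid_move(nx, ny, rows, cols) and not visited[nx][ny]:
--                 if grid[nx][ny] == grid[x][y] + 1:
--                     visited[nx][ny] = True
--                     queue.append((nx, ny))
--
--     return reachable_9s
-- ===== SOURCE B (Python) =====
-- def bfs(start_x, start_y, grid):
--     """Counts reachable 9s by advancing a whole height-level frontier (set) at a time:
--     every step raises the height by exactly 1, so the cells visited at BFS depth k are
--     precisely the cells of height h0+k reachable from the start; the 9s are the frontier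
--     at level 9-h0."""
--     rows, cols = len(grid), len(grid[0])
--     frontier = {(start_x, start_y)}
--     h = grid[start_x][start_y]
--     while h < 9 and frontier:
--         nxt = set()
--         for (x, y) in frontier:
--             for (nx, ny) in ((x - 1, y), (x + 1, y), (x, y - 1), (x, y + 1)):
--                 if 0 <= nx < rows and 0 <= ny < cols and grid[nx][ny] == h + 1:
--                     nxt.add((nx, ny))
--         frontier = nxt
--         h += 1
--     return len(frontier) if h == 9 else 0
-- ===== Notes on version B (the rewrite author's own statement) =====
-- stated objective: simpler
-- what changed: Replaces the deque-and-visited-matrix BFS by level-synchronous frontier propagation: every edge raises the height by exactly 1, so the cells BFS visits at depth k are exactly the height-(h0+k) cells reachable from the start; B advances one frontier set per height level and returns the size of the level-9 frontier, with no queue and no visited matrix.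
-- outside the precondition, e.g. on bfs(0, -1, [[1, 2], [3, 4, 5]]): A returns 0, B returns 0; on bfs(0, 0, [[9, 9], [9]]): A returns 1, B returns 1; on bfs(5, 0, [[9]]): A raises IndexError, B raises IndexError
import Mathlib
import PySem

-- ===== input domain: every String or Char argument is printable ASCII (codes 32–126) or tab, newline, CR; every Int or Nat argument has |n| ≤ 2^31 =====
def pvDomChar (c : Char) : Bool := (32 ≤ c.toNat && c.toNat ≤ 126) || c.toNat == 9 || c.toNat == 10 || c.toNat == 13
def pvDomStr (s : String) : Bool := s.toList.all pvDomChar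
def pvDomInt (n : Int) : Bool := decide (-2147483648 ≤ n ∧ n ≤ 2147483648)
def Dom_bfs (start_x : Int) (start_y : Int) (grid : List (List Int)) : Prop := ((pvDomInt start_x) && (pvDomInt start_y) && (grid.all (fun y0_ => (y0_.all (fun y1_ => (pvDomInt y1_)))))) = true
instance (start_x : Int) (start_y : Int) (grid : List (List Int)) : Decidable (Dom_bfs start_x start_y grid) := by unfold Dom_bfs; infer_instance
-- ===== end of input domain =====

-- B replaces the deque BFS by level-synchronous frontier-set propagation (one set of cells per
-- height level); same return value, no visited matrix and no queue (objective: simpler).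

-- ===== PORT A =====
-- grid[x][y] (Python negative wrap; default 0 is never read under Pre_, where all accesses are in range)
def pvGetA (g : List (List Int)) (x y : Int) : Int :=
  ((PySem.List.pyGet? g x).bind fun r => PySem.List.pyGet? r y).getD 0

def is_valid_move (x y rows cols : Int) : Bool :=
  decide (0 ≤ x) && decide (x < rows) && decide (0 ≤ y) && decide (y < cols)

-- visited[x][y]
def pvVisGet (vis : List (List Bool)) (x y : Int) : Bool :=
  ((PySem.List.pyGet? vis x).bind fun r => PySem.List.pyGet? r y).getD false

-- visited[x][y] = True
def pvVisSet (vis : List (List Bool)) (x y : Int) : List (List Bool) :=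
  PySem.List.pySetD vis x (PySem.List.pySetD ((PySem.List.pyGet? vis x).getD []) y true)

-- the 'while queue' loop; fuel is only a totality device (rows*cols+1 iterations always suffice)
def pvBfsLoop (g : List (List Int)) (rows cols : Int) :
    Nat → List (Int × Int) → List (List Bool) → Int → Int
  | 0, _, _, n => n
  | _ + 1, [], _, n => n
  | fuel + 1, (x, y) :: q, vis, n =>
    let n' := if pvGetA g x y = 9 then n + 1 else n
    let st := [((-1 : Int), (0 : Int)), (1, 0), (0, -1), (0, 1)].foldl
      (fun (st : List (List Bool) × List (Int × Int)) d =>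
        let nx := x + d.1
        let ny := y + d.2
        if is_valid_move nx ny rows cols && !pvVisGet st.1 nx ny then
          if pvGetA g nx ny = pvGetA g x y + 1 then
            (pvVisSet st.1 nx ny, st.2 ++ [(nx, ny)])
          else st
        else st) (vis, q)
    pvBfsLoop g rows cols fuel st.2 st.1 n'

def bfs (start_x : Int) (start_y : Int) (grid : List (List Int)) : Int :=
  let rows : Int := grid.length
  let cols : Int := (grid.headD []).length
  let visited := List.replicate grid.length (List.replicate (grid.headD []).length false)
  let visited := pvVisSet visited start_x start_y
  pvBfsLoop grid rows cols (grid.length * (grid.headD []).length + 1) [(start_x, start_y)] visited 0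

-- ===== PORT B =====
def pvGetB (g : List (List Int)) (x y : Int) : Int :=
  ((PySem.List.pyGet? g x).bind fun r => PySem.List.pyGet? r y).getD 0

-- one level: the set of in-bounds neighbours of the frontier whose height is h+1
def pvNext (g : List (List Int)) (rows cols h : Int) (fr : List (Int × Int)) : PySem.Set (Int × Int) :=
  fr.foldl (fun nf c =>
    [(c.1 - 1, c.2), (c.1 + 1, c.2), (c.1, c.2 - 1), (c.1, c.2 + 1)].foldl
      (fun nf' nb =>
        if (decide (0 ≤ nb.1) && decide (nb.1 < rows) && decide (0 ≤ nb.2) && decide (nb.2 < cols))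
            && decide (pvGetB g nb.1 nb.2 = h + 1)
        then PySem.Set.add nf' nb else nf') nf) PySem.Set.empty

-- 'while h < 9 and frontier': fuel (9-h).toNat encodes exactly the 'h < 9' test (h grows by 1 per turn)
def pvAltLoop (g : List (List Int)) (rows cols : Int) :
    Nat → List (Int × Int) → Int → List (Int × Int) × Int
  | 0, fr, h => (fr, h)
  | fuel + 1, fr, h =>
    if fr.isEmpty then (fr, h)
    else pvAltLoop g rows cols fuel (pvNext g rows cols h fr) (h + 1)

def bfs_alt (start_x : Int) (start_y : Int) (grid : List (List Int)) : Int :=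
  let rows : Int := grid.length
  let cols : Int := (grid.headD []).length
  let frontier : PySem.Set (Int × Int) := PySem.Set.ofList [(start_x, start_y)]
  let h := pvGetB grid start_x start_y
  let r := pvAltLoop grid rows cols (9 - h).toNat frontier h
  if r.2 = 9 then (PySem.Set.len r.1 : Int) else 0

-- ===== PRECONDITION & SPEC =====
-- Pre_ is the natural domain of the function: a nonempty grid whose rows all reach the width
-- cols = len(grid[0]) (rectangular when start_y is negative, so that the columns the two index
-- conventions name coincide) and a start index in Python range (negative wrap allowed).
-- Outside it A raises IndexError (empty grid, start out of range, a reachable cell on a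
-- too-short row), except for some ragged grids A happens to traverse without touching a short
-- or over-long row, which the claim does not cover.
def Pre_bfs (start_x : Int) (start_y : Int) (grid : List (List Int)) : Prop :=
  grid ≠ [] ∧ -(grid.length : Int) ≤ start_x ∧ start_x < grid.length ∧
    -((grid.headD []).length : Int) ≤ start_y ∧ start_y < (grid.headD []).length ∧
    (∀ row ∈ grid, (grid.headD []).length ≤ row.length) ∧
    (start_y < 0 → ∀ row ∈ grid, row.length = (grid.headD []).length)
instance (start_x : Int) (start_y : Int) (grid : List (List Int)) : Decidable (Pre_bfs start_x start_y grid) := by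
  unfold Pre_bfs; infer_instance

def pvWitness_bfs : Int × Int × List (List Int) := (0, 0, [[8, 9], [7, 8]])

def Spec_bfs (start_x : Int) (start_y : Int) (grid : List (List Int)) (out : Int) : Prop := out = bfs_alt start_x start_y grid
instance (start_x : Int) (start_y : Int) (grid : List (List Int)) (out : Int) : Decidable (Spec_bfs start_x start_y grid out) := by unfold Spec_bfs; infer_instance

-- ===== CLAIM (what is proved, stated in full; the proofs are below) =====
def Claim_equal_bfs : Prop := ∀ (start_x : Int) (start_y : Int) (grid : List (List Int)), Dom_bfs start_x start_y grid → Pre_bfs start_x start_y grid → Spec_bfs start_x start_y grid (bfs start_x start_y grid)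

-- ===== LEMMAS AND PROOFS =====


-- proof-side machinery: the level sets ("frontiers") of the strictly-height-increasing step graph

def pvCols (g : List (List Int)) : Int := ((g.headD []).length : Int)

def pvDirs : List (Int × Int) := [((-1 : Int), (0 : Int)), (1, 0), (0, -1), (0, 1)]

def pvInB (g : List (List Int)) (c : Int × Int) : Bool :=
  is_valid_move c.1 c.2 (g.length : Int) (pvCols g)

noncomputable def pvBox (g : List (List Int)) : Finset (Int × Int) :=
  Finset.Icc 0 ((g.length : Int) - 1) ×ˢ Finset.Icc 0 (pvCols g - 1)

def pvH (g : List (List Int)) (c : Int × Int) : Int := pvGetA g c.1 c.2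

def pvStepB (g : List (List Int)) (p c : Int × Int) : Bool :=
  pvInB g c && decide ((c.1 - p.1, c.2 - p.2) ∈ pvDirs) &&
    decide (pvH g c = pvH g p + 1)

noncomputable def pvFront (g : List (List Int)) (S0 : Finset (Int × Int)) : Nat → Finset (Int × Int)
  | 0 => S0
  | k + 1 => (pvBox g).filter fun c => ∃ p ∈ pvFront g S0 k, pvStepB g p c = true

-- the effective (wrapped) index Python uses for an in-range possibly negative index
def pvIdxN (n : Nat) (i : Int) : Nat := if 0 ≤ i then i.toNat else n - (-i).toNat

def pvEff (g : List (List Int)) (c : Int × Int) : Int × Int :=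
  ((pvIdxN g.length c.1 : Int), (pvIdxN (g.headD []).length c.2 : Int))

def pvShape (g : List (List Int)) (vis : List (List Bool)) : Prop :=
  vis.length = g.length ∧ ∀ r ∈ vis, r.length = (g.headD []).length

noncomputable def pvVisF (g : List (List Int)) (vis : List (List Bool)) : Finset (Int × Int) :=
  (pvBox g).filter fun c => pvVisGet vis c.1 c.2 = true

noncomputable def pvNineCount (g : List (List Int)) (S0 : Finset (Int × Int)) (h0 : Int) : Int :=
  if h0 ≤ 9 then ((pvFront g S0 (9 - h0).toNat).card : Int) else 0

lemma mem_pvBox (g : List (List Int)) (c : Int × Int) : c ∈ pvBox g ↔ pvInB g c = true := by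
  simp [pvBox, pvInB, is_valid_move, Finset.mem_product, Finset.mem_Icc]
  omega

lemma pvGetB_eq : pvGetB = pvGetA := rfl

lemma inB_iff (g : List (List Int)) (c : Int × Int) :
    pvInB g c = true ↔
      0 ≤ c.1 ∧ c.1 < (g.length : Int) ∧ 0 ≤ c.2 ∧ c.2 < ((g.headD []).length : Int) := by
  simp [pvInB, is_valid_move, pvCols]
  tauto

lemma stepB_iff (g : List (List Int)) (p c : Int × Int) :
    pvStepB g p c = true ↔
      pvInB g c = true ∧ (c.1 - p.1, c.2 - p.2) ∈ pvDirs ∧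
        pvH g c = pvH g p + 1 := by
  simp [pvStepB]
  tauto

lemma mem_pvNbrs (c x : Int × Int) :
    x ∈ [(c.1 - 1, c.2), (c.1 + 1, c.2), (c.1, c.2 - 1), (c.1, c.2 + 1)] ↔
      (x.1 - c.1, x.2 - c.2) ∈ pvDirs := by
  cases x with | mk a b =>
  cases c with | mk u v =>
  simp only [pvDirs, List.mem_cons, List.not_mem_nil, or_false, Prod.mk.injEq]
  constructor
  · rintro (⟨h1, h2⟩ | ⟨h1, h2⟩ | ⟨h1, h2⟩ | ⟨h1, h2⟩) <;> subst h1 <;> subst h2 <;> simp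
  · rintro (⟨h1, h2⟩ | ⟨h1, h2⟩ | ⟨h1, h2⟩ | ⟨h1, h2⟩)
    · left; constructor <;> omega
    · right; left; constructor <;> omega
    · right; right; left; constructor <;> omega
    · right; right; right; constructor <;> omega

lemma front_height (g : List (List Int)) (S0 : Finset (Int × Int)) (h0 : Int)
    (hSh : ∀ c ∈ S0, pvH g c = h0) :
    ∀ k c, c ∈ pvFront g S0 k → pvH g c = h0 + (k : Int) := by
  intro k
  induction k with
  | zero =>
    intro c hc
    simp only [pvFront] at hc
    simp [hSh c hc]
  | succ k ih =>
    intro c hc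
    simp only [pvFront, Finset.mem_filter] at hc
    obtain ⟨-, p, hp, hstep⟩ := hc
    rw [stepB_iff] at hstep
    have := ih p hp
    push_cast
    omega

lemma front_succ_mem (g : List (List Int)) (S0 : Finset (Int × Int)) (k : Nat) (c : Int × Int) :
    c ∈ pvFront g S0 (k + 1) ↔ c ∈ pvBox g ∧ ∃ p ∈ pvFront g S0 k, pvStepB g p c = true := by
  simp [pvFront, Finset.mem_filter, and_comm]

lemma front_empty_le (g : List (List Int)) (S0 : Finset (Int × Int)) (k : Nat)
    (h : pvFront g S0 k = ∅) : ∀ j, k ≤ j → pvFront g S0 j = ∅ := by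
  intro j hj
  induction j, hj using Nat.le_induction with
  | base => exact h
  | succ j hj ih =>
    ext c
    rw [front_succ_mem]
    simp [ih]

-- visited-matrix bookkeeping

lemma visSet_eq (g : List (List Int)) (vis : List (List Bool)) (x y : Int)
    (hsh : pvShape g vis) (hxy : pvInB g (x, y) = true) :
    ∃ row, PySem.List.pyGet? vis x = some row ∧ row ∈ vis ∧
      row.length = (g.headD []).length ∧
      pvVisSet vis x y = vis.set x.toNat (row.set y.toNat true) ∧
      x.toNat < vis.length := by
  obtain ⟨hx0, hx1, hy0, hy1⟩ := (inB_iff g (x, y)).mp hxy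
  dsimp only at hx0 hx1 hy0 hy1
  obtain ⟨hlen, hrow⟩ := hsh
  have hxlt : x.toNat < vis.length := by omega
  refine ⟨vis[x.toNat], ?_, List.getElem_mem hxlt, hrow _ (List.getElem_mem hxlt), ?_, hxlt⟩
  · rw [PySem.List.pyGet?_of_nonneg _ hx0]
    exact List.getElem?_eq_getElem hxlt
  · unfold pvVisSet
    rw [PySem.List.pyGet?_of_nonneg _ hx0, List.getElem?_eq_getElem hxlt]
    simp only [Option.getD_some]
    rw [PySem.List.pySetD_of_nonneg _ _ hy0, PySem.List.pySetD_of_nonneg _ _ hx0]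

lemma shape_visSet (g : List (List Int)) (vis : List (List Bool)) (x y : Int)
    (hsh : pvShape g vis) (hxy : pvInB g (x, y) = true) : pvShape g (pvVisSet vis x y) := by
  obtain ⟨row, -, -, hrl, heq, -⟩ := visSet_eq g vis x y hsh hxy
  obtain ⟨hlen, hrow⟩ := hsh
  rw [heq]
  constructor
  · simp [hlen]
  · intro r hr
    rcases List.mem_or_eq_of_mem_set hr with hmem | rfl
    · exact hrow r hmem
    · simp [hrl]

lemma visGet_visSet (g : List (List Int)) (vis : List (List Bool)) (x y a b : Int)
    (hsh : pvShape g vis) (hxy : pvInB g (x, y) = true) (hab : pvInB g (a, b) = true) :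
    pvVisGet (pvVisSet vis x y) a b = if a = x ∧ b = y then true else pvVisGet vis a b := by
  obtain ⟨row, hget, -, hrl, heq, hxlt⟩ := visSet_eq g vis x y hsh hxy
  obtain ⟨hx0, hx1, hy0, hy1⟩ := (inB_iff g (x, y)).mp hxy
  obtain ⟨ha0, ha1, hb0, hb1⟩ := (inB_iff g (a, b)).mp hab
  dsimp only at hx0 hx1 hy0 hy1 ha0 ha1 hb0 hb1
  obtain ⟨hlen, hrowlen⟩ := hsh
  have halt : a.toNat < vis.length := by omega
  have hblt : b.toNat < row.length := by omega
  rw [heq]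
  unfold pvVisGet
  rw [PySem.List.pyGet?_of_nonneg _ ha0, PySem.List.pyGet?_of_nonneg _ ha0,
    List.getElem?_set]
  by_cases hax : a = x
  · subst hax
    rw [if_pos (by omega), if_pos hxlt]
    simp only [Option.bind_some]
    rw [PySem.List.pyGet?_of_nonneg _ hb0, List.getElem?_set]
    by_cases hby : b = y
    · subst hby
      rw [if_pos (by omega), if_pos hblt, if_pos (by simp)]
      rfl
    · rw [if_neg (by omega), if_neg (by tauto)]
      have hv : vis[a.toNat]? = some row := by
        rw [PySem.List.pyGet?_of_nonneg _ hx0] at hget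
        exact hget
      rw [hv]
      simp only [Option.bind_some]
      rw [PySem.List.pyGet?_of_nonneg _ hb0]
  · rw [if_neg (by omega), if_neg (by tauto)]

lemma box_card (g : List (List Int)) :
    (pvBox g).card = g.length * (g.headD []).length := by
  rw [pvBox, Finset.card_product, Int.card_Icc, Int.card_Icc]
  simp [pvCols]

lemma mem_pvVisF (g : List (List Int)) (vis : List (List Bool)) (c : Int × Int) :
    c ∈ pvVisF g vis ↔ pvInB g c = true ∧ pvVisGet vis c.1 c.2 = true := by
  simp [pvVisF, Finset.mem_filter, mem_pvBox]

lemma visF_visSet (g : List (List Int)) (vis : List (List Bool)) (x y : Int)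
    (hsh : pvShape g vis) (hxy : pvInB g (x, y) = true) :
    pvVisF g (pvVisSet vis x y) = insert (x, y) (pvVisF g vis) := by
  ext c
  obtain ⟨a, b⟩ := c
  simp only [mem_pvVisF, Finset.mem_insert]
  constructor
  · rintro ⟨hab, hv⟩
    rw [visGet_visSet g vis x y a b hsh hxy hab] at hv
    split_ifs at hv with h
    · left; exact Prod.ext_iff.mpr h
    · right; exact ⟨hab, hv⟩
  · rintro (heq | ⟨hab, hv⟩)
    · obtain ⟨h1, h2⟩ := Prod.ext_iff.mp heq
      dsimp only at h1 h2
      subst h1; subst h2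
      refine ⟨hxy, ?_⟩
      rw [visGet_visSet g vis a b a b hsh hxy hxy]
      simp
    · refine ⟨hab, ?_⟩
      rw [visGet_visSet g vis x y a b hsh hxy hab]
      split_ifs with h
      · rfl
      · exact hv

-- the closing argument: the final visited set is exactly the union of the frontiers,
-- so the number of visited 9s is pvNineCount

lemma closed_count (g : List (List Int)) (S0 E V : Finset (Int × Int)) (h0 : Int)
    (hSh : ∀ c ∈ S0, pvH g c = h0) (hEh : ∀ c ∈ E, pvH g c = h0) (hcard : E.card = S0.card)
    (hreach : ∀ c ∈ V, c ∈ E ∨ ∃ k, 1 ≤ k ∧ c ∈ pvFront g S0 k)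
    (hbase : pvFront g S0 1 ⊆ V) (hEsub : E ⊆ V)
    (hclosed : ∀ p ∈ V, p ∉ E → ∀ c, pvStepB g p c = true → c ∈ V) :
    ((V.filter (fun c => pvH g c = 9)).card : Int) = pvNineCount g S0 h0 := by
  have hsub : ∀ k, 1 ≤ k → pvFront g S0 k ⊆ V := by
    intro k hk
    induction k with
    | zero => omega
    | succ k ih =>
      rcases Nat.lt_or_ge k 1 with hk1 | hk1
      · have hk0 : k = 0 := by omega
        subst hk0
        exact hbase
      · intro c hc
        rw [front_succ_mem] at hc
        obtain ⟨-, p, hp, hstep⟩ := hc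
        have hpV := ih hk1 hp
        have hpE : p ∉ E := by
          intro hpE
          have hh1 := front_height g S0 h0 hSh k p hp
          have hh2 := hEh p hpE
          omega
        exact hclosed p hpV hpE c hstep
  unfold pvNineCount
  by_cases h9 : h0 ≤ 9
  · rw [if_pos h9]
    by_cases h99 : h0 = 9
    · have hK : (9 - h0).toNat = 0 := by omega
      rw [hK]
      have hfe : V.filter (fun c => pvH g c = 9) = E := by
        apply Finset.ext
        intro c
        simp only [Finset.mem_filter]
        constructor
        · rintro ⟨hcV, hc9⟩
          rcases hreach c hcV with h | ⟨k, hk1, hkF⟩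
          · exact h
          · have := front_height g S0 h0 hSh k c hkF
            omega
        · intro hcE
          exact ⟨hEsub hcE, by rw [hEh c hcE, h99]⟩
      rw [hfe]
      rw [show pvFront g S0 0 = S0 from rfl, hcard]
    · have hK1 : 1 ≤ (9 - h0).toNat := by omega
      have hfe : V.filter (fun c => pvH g c = 9) = pvFront g S0 (9 - h0).toNat := by
        apply Finset.ext
        intro c
        simp only [Finset.mem_filter]
        constructor
        · rintro ⟨hcV, hc9⟩
          rcases hreach c hcV with h | ⟨k, hk1, hkF⟩
          · have := hEh c h
            omega
          · have := front_height g S0 h0 hSh k c hkF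
            have hkk : k = (9 - h0).toNat := by omega
            exact hkk ▸ hkF
        · intro hc
          have := front_height g S0 h0 hSh _ c hc
          exact ⟨hsub _ hK1 hc, by omega⟩
      rw [hfe]
  · rw [if_neg h9]
    have hfe : V.filter (fun c => pvH g c = 9) = ∅ := by
      apply Finset.eq_empty_iff_forall_notMem.mpr
      intro c hc
      simp only [Finset.mem_filter] at hc
      rcases hreach c hc.1 with h | ⟨k, hk1, hkF⟩
      · have := hEh c h
        omega
      · have := front_height g S0 h0 hSh k c hkF
        omega
    rw [hfe]
    simp

-- one pass of the inner `for dx, dy in directions` fold of A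

lemma foldA_spec (g : List (List Int)) (x y : Int) :
    ∀ (ds : List (Int × Int)), (∀ d ∈ ds, d ∈ pvDirs) → ∀ vis q, pvShape g vis →
    ∃ (l : List (Int × Int)) (vis' : List (List Bool)),
      (ds.foldl
        (fun (st : List (List Bool) × List (Int × Int)) d =>
          let nx := x + d.1
          let ny := y + d.2
          if is_valid_move nx ny (g.length : Int) (pvCols g) && !pvVisGet st.1 nx ny then
            if pvGetA g nx ny = pvGetA g x y + 1 then
              (pvVisSet st.1 nx ny, st.2 ++ [(nx, ny)])
            else st
          else st) (vis, q)) = (vis', q ++ l) ∧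
      pvShape g vis' ∧ l.Nodup ∧
      (∀ c ∈ l, c ∉ pvVisF g vis ∧ pvStepB g (x, y) c = true) ∧
      pvVisF g vis' = pvVisF g vis ∪ l.toFinset ∧
      (∀ d ∈ ds, pvStepB g (x, y) (x + d.1, y + d.2) = true → (x + d.1, y + d.2) ∈ pvVisF g vis') := by
  intro ds
  induction ds with
  | nil =>
    intro _ vis q hsh
    exact ⟨[], vis, by simp, hsh, List.nodup_nil, by simp, by simp, by simp⟩
  | cons d ds ih =>
    intro hds vis q hsh
    have hd : d ∈ pvDirs := hds d (List.mem_cons_self ..)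
    have hds' : ∀ e ∈ ds, e ∈ pvDirs := fun e he => hds e (List.mem_cons_of_mem _ he)
    rw [List.foldl_cons]
    dsimp only
    have hinb : is_valid_move (x + d.1) (y + d.2) (g.length : Int) (pvCols g)
        = pvInB g (x + d.1, y + d.2) := rfl
    by_cases h1 : (is_valid_move (x + d.1) (y + d.2) (g.length : Int) (pvCols g)
        && !pvVisGet vis (x + d.1) (y + d.2)) = true
    · by_cases h2 : pvGetA g (x + d.1) (y + d.2) = pvGetA g x y + 1
      · rw [if_pos h1, if_pos h2]
        obtain ⟨hv1, hv2⟩ := Bool.and_eq_true_iff.mp h1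
        have hcB : pvInB g (x + d.1, y + d.2) = true := by rw [← hinb]; exact hv1
        have hvfalse : pvVisGet vis (x + d.1) (y + d.2) = false := by simpa using hv2
        have hcnotvis : (x + d.1, y + d.2) ∉ pvVisF g vis := by
          rw [mem_pvVisF]
          rintro ⟨-, hget⟩
          dsimp only at hget
          rw [hvfalse] at hget
          exact Bool.false_ne_true hget
        have hstep : pvStepB g (x, y) (x + d.1, y + d.2) = true := by
          rw [stepB_iff]
          refine ⟨hcB, ?_, ?_⟩
          · have hdc : ((x + d.1, y + d.2).1 - (x, y).1, (x + d.1, y + d.2).2 - (x, y).2) = d := by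
              cases d; simp
            rw [hdc]; exact hd
          · simpa [pvH] using h2
        have hsh1 : pvShape g (pvVisSet vis (x + d.1) (y + d.2)) := shape_visSet g vis _ _ hsh hcB
        obtain ⟨l', vis', heq, hsh', hnd', hprop', hvf', hcov'⟩ :=
          ih hds' (pvVisSet vis (x + d.1) (y + d.2)) (q ++ [(x + d.1, y + d.2)]) hsh1
        have hvf1 : pvVisF g (pvVisSet vis (x + d.1) (y + d.2))
            = insert (x + d.1, y + d.2) (pvVisF g vis) := visF_visSet g vis _ _ hsh hcB
        refine ⟨(x + d.1, y + d.2) :: l', vis', ?_, hsh', ?_, ?_, ?_, ?_⟩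
        · rw [show q ++ (x + d.1, y + d.2) :: l' = (q ++ [(x + d.1, y + d.2)]) ++ l' by simp]
          exact heq
        · rw [List.nodup_cons]
          refine ⟨fun hcl => ?_, hnd'⟩
          exact (hprop' _ hcl).1 (by rw [hvf1]; exact Finset.mem_insert_self _ _)
        · intro e he
          rcases List.mem_cons.mp he with rfl | hel
          · exact ⟨hcnotvis, hstep⟩
          · obtain ⟨hnv, hst⟩ := hprop' e hel
            refine ⟨fun hev => hnv ?_, hst⟩
            rw [hvf1]
            exact Finset.mem_insert_of_mem hev
        · rw [hvf', hvf1]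
          ext e
          simp only [Finset.mem_union, Finset.mem_insert, List.toFinset_cons, List.mem_toFinset]
          tauto
        · intro e hede hst
          rcases List.mem_cons.mp hede with rfl | hee
          · rw [hvf', hvf1]
            exact Finset.mem_union_left _ (Finset.mem_insert_self _ _)
          · exact hcov' e hee hst
      · rw [if_pos h1, if_neg h2]
        obtain ⟨l', vis', heq, hsh', hnd', hprop', hvf', hcov'⟩ := ih hds' vis q hsh
        refine ⟨l', vis', heq, hsh', hnd', hprop', hvf', ?_⟩
        intro e hede hst
        rcases List.mem_cons.mp hede with rfl | hee
        · exfalso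
          rw [stepB_iff] at hst
          exact h2 (by simpa [pvH] using hst.2.2)
        · exact hcov' e hee hst
    · rw [if_neg h1]
      obtain ⟨l', vis', heq, hsh', hnd', hprop', hvf', hcov'⟩ := ih hds' vis q hsh
      refine ⟨l', vis', heq, hsh', hnd', hprop', hvf', ?_⟩
      intro e hede hst
      rcases List.mem_cons.mp hede with rfl | hee
      · rw [stepB_iff] at hst
        have hcB : pvInB g (x + e.1, y + e.2) = true := hst.1
        have hvget : pvVisGet vis (x + e.1) (y + e.2) = true := by
          by_contra hng
          apply h1
          rw [hinb, hcB]
          simp only [Bool.true_and, Bool.not_eq_true']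
          exact Bool.not_eq_true _ ▸ (Bool.eq_false_iff.mpr hng)
        have : (x + e.1, y + e.2) ∈ pvVisF g vis := (mem_pvVisF g vis _).mpr ⟨hcB, hvget⟩
        rw [hvf']
        exact Finset.mem_union_left _ this
      · exact hcov' e hee hst

lemma bfsLoop_eq (g : List (List Int)) (S0 E : Finset (Int × Int)) (h0 : Int)
    (hSh : ∀ c ∈ S0, pvH g c = h0) (hEh : ∀ c ∈ E, pvH g c = h0) (hcard : E.card = S0.card) :
    ∀ (fuel : Nat) (q : List (Int × Int)) (vis : List (List Bool)) (n : Int),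
    pvShape g vis → q.Nodup → (∀ c ∈ q, c ∈ pvVisF g vis) →
    (∀ c ∈ q, ∃ k, 1 ≤ k ∧ c ∈ pvFront g S0 k) →
    (∀ c ∈ pvVisF g vis, c ∈ E ∨ ∃ k, 1 ≤ k ∧ c ∈ pvFront g S0 k) →
    pvFront g S0 1 ⊆ pvVisF g vis →
    (∀ p ∈ pvVisF g vis, p ∉ E → p ∉ q → ∀ c, pvStepB g p c = true → c ∈ pvVisF g vis) →
    n = ((((pvVisF g vis) \ q.toFinset).filter (fun c => pvH g c = 9)).card : Int) →
    E ⊆ pvVisF g vis →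
    q.length + ((pvBox g).card - (pvVisF g vis).card) ≤ fuel →
    pvBfsLoop g (g.length : Int) (pvCols g) fuel q vis n = pvNineCount g S0 h0 := by
  have loop_done : ∀ (vis : List (List Bool)) (n : Int),
      (∀ c ∈ pvVisF g vis, c ∈ E ∨ ∃ k, 1 ≤ k ∧ c ∈ pvFront g S0 k) →
      pvFront g S0 1 ⊆ pvVisF g vis →
      (∀ p ∈ pvVisF g vis, p ∉ E → p ∉ ([] : List (Int × Int)) → ∀ c, pvStepB g p c = true → c ∈ pvVisF g vis) →
      n = ((((pvVisF g vis) \ ([] : List (Int × Int)).toFinset).filter (fun c => pvH g c = 9)).card : Int) →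
      E ⊆ pvVisF g vis → n = pvNineCount g S0 h0 := by
    intro vis n hreach hbase hclosed hcount hEsub
    rw [hcount, show (([] : List (Int × Int)).toFinset) = (∅ : Finset (Int × Int)) from rfl,
      Finset.sdiff_empty]
    exact closed_count g S0 E (pvVisF g vis) h0 hSh hEh hcard hreach hbase hEsub
      (fun p hp hpE c hc => hclosed p hp hpE (by simp) c hc)
  intro fuel
  induction fuel with
  | zero =>
    intro q vis n hsh hnd hqv hqF hreach hbase hclosed hcount hEsub hfuel
    have hq : q = [] := by
      cases q with
      | nil => rfl
      | cons a q => simp at hfuel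
    subst hq
    simp only [pvBfsLoop]
    exact loop_done vis n hreach hbase hclosed hcount hEsub
  | succ fuel ih =>
    intro q vis n hsh hnd hqv hqF hreach hbase hclosed hcount hEsub hfuel
    cases q with
    | nil =>
      simp only [pvBfsLoop]
      exact loop_done vis n hreach hbase hclosed hcount hEsub
    | cons hd tl =>
      obtain ⟨x, y⟩ := hd
      simp only [pvBfsLoop]
      have hxyV : (x, y) ∈ pvVisF g vis := hqv _ (List.mem_cons_self ..)
      obtain ⟨kx, hkx1, hkxF⟩ := hqF _ (List.mem_cons_self ..)
      obtain ⟨l, vis', heq, hsh', hndl, hprop, hvf, hcov⟩ :=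
        foldA_spec g x y [((-1 : Int), (0 : Int)), (1, 0), (0, -1), (0, 1)]
          (fun e he => he) vis tl hsh
      rw [heq]
      have hdisj : ∀ e ∈ l, e ∉ pvVisF g vis := fun e he => (hprop e he).1
      have hxl : (x, y) ∉ l := fun h => hdisj _ h hxyV
      have hndc := List.nodup_cons.mp hnd
      have htlV : ∀ e ∈ tl, e ∈ pvVisF g vis := fun e he => hqv e (List.mem_cons_of_mem _ he)
      have hlF : ∀ e ∈ l, e ∈ pvFront g S0 (kx + 1) := by
        intro e he
        have hstep := (hprop e he).2
        refine (front_succ_mem g S0 kx e).mpr ⟨?_, ⟨(x, y), hkxF, hstep⟩⟩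
        exact (mem_pvBox g e).mpr ((stepB_iff g _ _).mp hstep).1
      have hnd2 : (tl ++ l).Nodup := by
        rw [List.nodup_append]
        refine ⟨hndc.2, hndl, ?_⟩
        intro e he b hb heb
        subst heb
        exact hdisj e hb (htlV e he)
      have hqv2 : ∀ e ∈ tl ++ l, e ∈ pvVisF g vis' := by
        intro e he
        rw [hvf]
        rcases List.mem_append.mp he with h | h
        · exact Finset.mem_union_left _ (htlV e h)
        · exact Finset.mem_union_right _ (List.mem_toFinset.mpr h)
      have hqF2 : ∀ e ∈ tl ++ l, ∃ k, 1 ≤ k ∧ e ∈ pvFront g S0 k := by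
        intro e he
        rcases List.mem_append.mp he with h | h
        · exact hqF e (List.mem_cons_of_mem _ h)
        · exact ⟨kx + 1, by omega, hlF e h⟩
      have hreach2 : ∀ e ∈ pvVisF g vis', e ∈ E ∨ ∃ k, 1 ≤ k ∧ e ∈ pvFront g S0 k := by
        intro e heV
        rw [hvf] at heV
        rcases Finset.mem_union.mp heV with h | h
        · exact hreach e h
        · exact Or.inr ⟨kx + 1, by omega, hlF e (List.mem_toFinset.mp h)⟩
      have hbase2 : pvFront g S0 1 ⊆ pvVisF g vis' := by
        intro e he
        rw [hvf]
        exact Finset.mem_union_left _ (hbase he)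
      have hclosed2 : ∀ p ∈ pvVisF g vis', p ∉ E → p ∉ tl ++ l → ∀ e, pvStepB g p e = true → e ∈ pvVisF g vis' := by
        intro p hpV hpE hpq e hst
        rw [hvf] at hpV
        rcases Finset.mem_union.mp hpV with hpV | hpl
        · by_cases hpx : p = (x, y)
          · subst hpx
            rw [stepB_iff] at hst
            obtain ⟨heB, hdm, hh⟩ := hst
            have he' : e = (x + (e.1 - x), y + (e.2 - y)) := by cases e; simp
            have h2 : pvStepB g (x, y) (x + (e.1 - x), y + (e.2 - y)) = true := by
              rw [← he', stepB_iff]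
              exact ⟨heB, hdm, hh⟩
            have := hcov (e.1 - x, e.2 - y) hdm h2
            rw [← he'] at this
            exact this
          · have hpt : p ∉ tl := fun h => hpq (List.mem_append.mpr (Or.inl h))
            have hin : e ∈ pvVisF g vis := by
              refine hclosed p hpV hpE ?_ e hst
              intro hin
              rcases List.mem_cons.mp hin with h | h
              · exact hpx h
              · exact hpt h
            rw [hvf]
            exact Finset.mem_union_left _ hin
        · exact absurd (List.mem_append.mpr (Or.inr (List.mem_toFinset.mp hpl))) hpq
      have hset : pvVisF g vis' \ (tl ++ l).toFinset
          = insert (x, y) (pvVisF g vis \ ((x, y) :: tl).toFinset) := by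
        ext e
        simp only [hvf, Finset.mem_sdiff, Finset.mem_union, List.toFinset_append,
          Finset.mem_insert, List.mem_toFinset, List.toFinset_cons]
        constructor
        · rintro ⟨hev | hel, hne⟩
          · by_cases hex : e = (x, y)
            · exact Or.inl hex
            · right
              refine ⟨hev, fun hin => ?_⟩
              rcases hin with h | h
              · exact hex h
              · exact hne (Or.inl h)
          · exact absurd (Or.inr hel) hne
        · rintro (rfl | ⟨hev, hne⟩)
          · refine ⟨Or.inl hxyV, fun hin => ?_⟩
            rcases hin with h | h
            · exact hndc.1 h
            · exact hxl h
          · refine ⟨Or.inl hev, fun hin => ?_⟩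
            rcases hin with h | h
            · exact hne (Or.inr h)
            · exact hdisj e h hev
      have hxynot : (x, y) ∉ (pvVisF g vis \ ((x, y) :: tl).toFinset) := by
        simp [Finset.mem_sdiff]
      have hcount2 : (if pvGetA g x y = 9 then n + 1 else n)
          = (((pvVisF g vis' \ (tl ++ l).toFinset).filter (fun c => pvH g c = 9)).card : Int) := by
        rw [hset, Finset.filter_insert]
        by_cases h9 : pvH g (x, y) = 9
        · rw [if_pos h9, Finset.card_insert_of_notMem
            (fun hmem => hxynot (Finset.mem_of_mem_filter _ hmem))]
          rw [if_pos (by simpa [pvH] using h9), hcount]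
          push_cast
          ring
        · rw [if_neg h9, if_neg (by simpa [pvH] using h9), hcount]
      have hEsub2 : E ⊆ pvVisF g vis' := by
        intro e he
        rw [hvf]
        exact Finset.mem_union_left _ (hEsub he)
      have hcard2 : (pvVisF g vis').card = (pvVisF g vis).card + l.length := by
        rw [hvf, Finset.card_union_of_disjoint (by
          rw [Finset.disjoint_left]
          intro a haV hal
          exact hdisj a (List.mem_toFinset.mp hal) haV), List.toFinset_card_of_nodup hndl]
      have hsub : (pvVisF g vis').card ≤ (pvBox g).card :=
        Finset.card_le_card (Finset.filter_subset _ _)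
      have hfuel2 : (tl ++ l).length + ((pvBox g).card - (pvVisF g vis').card) ≤ fuel := by
        simp only [List.length_append, List.length_cons] at hfuel ⊢
        omega
      exact ih (tl ++ l) vis' _ hsh' hnd2 hqv2 hqF2 hreach2 hbase2 hclosed2 hcount2 hEsub2 hfuel2

-- B side

lemma mem_condfold (L : List (Int × Int)) (p : Int × Int → Bool) :
    ∀ (nf : PySem.Set (Int × Int)) (x : Int × Int),
      x ∈ L.foldl (fun nf' nb => if p nb = true then PySem.Set.add nf' nb else nf') nf ↔
        x ∈ nf ∨ (x ∈ L ∧ p x = true) := by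
  induction L with
  | nil => simp
  | cons a L ih =>
    intro nf x
    rw [List.foldl_cons, ih]
    by_cases hpa : p a = true
    · rw [if_pos hpa, PySem.Set.mem_add]
      constructor
      · rintro ((hnf | rfl) | ⟨hL, hp⟩)
        · exact Or.inl hnf
        · exact Or.inr ⟨List.mem_cons_self .., hpa⟩
        · exact Or.inr ⟨List.mem_cons_of_mem _ hL, hp⟩
      · rintro (hnf | ⟨hm, hp⟩)
        · exact Or.inl (Or.inl hnf)
        · rcases List.mem_cons.mp hm with rfl | hL
          · exact Or.inl (Or.inr rfl)
          · exact Or.inr ⟨hL, hp⟩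
    · rw [if_neg hpa]
      constructor
      · rintro (hnf | ⟨hL, hp⟩)
        · exact Or.inl hnf
        · exact Or.inr ⟨List.mem_cons_of_mem _ hL, hp⟩
      · rintro (hnf | ⟨hm, hp⟩)
        · exact Or.inl hnf
        · rcases List.mem_cons.mp hm with rfl | hL
          · exact absurd hp hpa
          · exact Or.inr ⟨hL, hp⟩

lemma nodup_condfold (L : List (Int × Int)) (p : Int × Int → Bool) :
    ∀ (nf : PySem.Set (Int × Int)), nf.Nodup →
      (L.foldl (fun nf' nb => if p nb = true then PySem.Set.add nf' nb else nf') nf).Nodup := by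
  induction L with
  | nil => intro nf hnf; exact hnf
  | cons a L ih =>
    intro nf hnf
    rw [List.foldl_cons]
    by_cases hpa : p a = true
    · rw [if_pos hpa]
      exact ih _ (PySem.Set.nodup_add _ _ hnf)
    · rw [if_neg hpa]
      exact ih _ hnf

lemma mem_pvNext (g : List (List Int)) (h : Int) (fr : List (Int × Int)) (x : Int × Int) :
    x ∈ pvNext g (g.length : Int) (pvCols g) h fr ↔
      ∃ c ∈ fr, (x.1 - c.1, x.2 - c.2) ∈ pvDirs ∧ pvInB g x = true ∧ pvH g x = h + 1 := by
  have hcond : ∀ nb : Int × Int,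
      ((decide (0 ≤ nb.1) && decide (nb.1 < (g.length : Int)) && decide (0 ≤ nb.2) && decide (nb.2 < pvCols g))
        && decide (pvGetB g nb.1 nb.2 = h + 1)) = true ↔ pvInB g nb = true ∧ pvH g nb = h + 1 := by
    intro nb
    rw [pvGetB_eq]
    simp [pvInB, is_valid_move, pvH]
    try tauto
  unfold pvNext
  suffices hgen : ∀ nf : PySem.Set (Int × Int), x ∈ fr.foldl
      (fun nf c =>
        [(c.1 - 1, c.2), (c.1 + 1, c.2), (c.1, c.2 - 1), (c.1, c.2 + 1)].foldl
          (fun nf' nb =>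
            if ((decide (0 ≤ nb.1) && decide (nb.1 < (g.length : Int)) && decide (0 ≤ nb.2) && decide (nb.2 < pvCols g))
                && decide (pvGetB g nb.1 nb.2 = h + 1)) = true
            then PySem.Set.add nf' nb else nf') nf) nf ↔
      x ∈ nf ∨ ∃ c ∈ fr, (x.1 - c.1, x.2 - c.2) ∈ pvDirs ∧ pvInB g x = true ∧ pvH g x = h + 1 by
    rw [hgen PySem.Set.empty]
    simp [PySem.Set.empty]
  intro nf
  induction fr generalizing nf with
  | nil => simp
  | cons c fr ih =>
    rw [List.foldl_cons, ih, mem_condfold]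
    rw [hcond x, mem_pvNbrs]
    simp only [List.mem_cons]
    constructor
    · rintro ((hnf | ⟨hd, hb, hh⟩) | ⟨c', hc', hd, hb, hh⟩)
      · exact Or.inl hnf
      · exact Or.inr ⟨c, Or.inl rfl, hd, hb, hh⟩
      · exact Or.inr ⟨c', Or.inr hc', hd, hb, hh⟩
    · rintro (hnf | ⟨c', (rfl | hc'), hd, hb, hh⟩)
      · exact Or.inl (Or.inl hnf)
      · exact Or.inl (Or.inr ⟨hd, hb, hh⟩)
      · exact Or.inr ⟨c', hc', hd, hb, hh⟩

lemma nodup_pvNext (g : List (List Int)) (rows cols h : Int) (fr : List (Int × Int)) :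
    (pvNext g rows cols h fr).Nodup := by
  unfold pvNext
  suffices hgen : ∀ nf : PySem.Set (Int × Int), nf.Nodup → (fr.foldl
      (fun nf c =>
        [(c.1 - 1, c.2), (c.1 + 1, c.2), (c.1, c.2 - 1), (c.1, c.2 + 1)].foldl
          (fun nf' nb =>
            if ((decide (0 ≤ nb.1) && decide (nb.1 < rows) && decide (0 ≤ nb.2) && decide (nb.2 < cols))
                && decide (pvGetB g nb.1 nb.2 = h + 1)) = true
            then PySem.Set.add nf' nb else nf') nf) nf).Nodup by
    exact hgen PySem.Set.empty List.nodup_nil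
  intro nf hnf
  induction fr generalizing nf with
  | nil => exact hnf
  | cons c fr ih =>
    rw [List.foldl_cons]
    exact ih _ (nodup_condfold _ _ _ hnf)

lemma pvNext_toFinset (g : List (List Int)) (S0 : Finset (Int × Int)) (h0 : Int)
    (hSh : ∀ c ∈ S0, pvH g c = h0)
    (k : Nat) (fr : List (Int × Int)) (hfr : fr.toFinset = pvFront g S0 k) :
    (pvNext g (g.length : Int) (pvCols g) (h0 + (k : Int)) fr).toFinset = pvFront g S0 (k + 1) := by
  ext x
  rw [List.mem_toFinset, mem_pvNext, front_succ_mem]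
  have hmem : ∀ c, c ∈ fr ↔ c ∈ pvFront g S0 k := by
    intro c
    rw [← hfr, List.mem_toFinset]
  constructor
  · rintro ⟨c, hc, hd, hb, hh⟩
    have hcF := (hmem c).mp hc
    have hch := front_height g S0 h0 hSh k c hcF
    refine ⟨(mem_pvBox g x).mpr hb, c, hcF, ?_⟩
    rw [stepB_iff]
    exact ⟨hb, hd, by omega⟩
  · rintro ⟨hxB, c, hcF, hstep⟩
    rw [stepB_iff] at hstep
    obtain ⟨hxb, hd, hh⟩ := hstep
    have hch := front_height g S0 h0 hSh k c hcF
    exact ⟨c, (hmem c).mpr hcF, hd, hxb, by omega⟩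

lemma altLoop_eq (g : List (List Int)) (S0 : Finset (Int × Int)) (h0 : Int)
    (hSh : ∀ c ∈ S0, pvH g c = h0) (h9 : h0 ≤ 9) :
    ∀ (f : Nat) (k : Nat) (fr : List (Int × Int)),
    (k : Int) + (f : Int) = 9 - h0 → fr.Nodup → fr.toFinset = pvFront g S0 k →
    (if (pvAltLoop g (g.length : Int) (pvCols g) f fr (h0 + (k : Int))).2 = 9
      then PySem.Set.len (pvAltLoop g (g.length : Int) (pvCols g) f fr (h0 + (k : Int))).1
      else 0) = ((pvFront g S0 (9 - h0).toNat).card : Int) := by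
  intro f
  induction f with
  | zero =>
    intro k fr hkf hnd hfin
    simp only [pvAltLoop]
    rw [if_pos (by omega)]
    have hk : (9 - h0).toNat = k := by omega
    rw [hk, ← hfin, List.toFinset_card_of_nodup hnd]
    rfl
  | succ f ih =>
    intro k fr hkf hnd hfin
    simp only [pvAltLoop]
    by_cases hfe : fr.isEmpty = true
    · rw [if_pos hfe]
      rw [if_neg (by dsimp only; omega)]
      have hnil : fr = [] := List.isEmpty_iff.mp hfe
      have hfr0 : pvFront g S0 k = ∅ := by rw [← hfin, hnil]; rfl
      rw [front_empty_le g S0 k hfr0 _ (by omega)]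
      simp
    · rw [if_neg hfe]
      have hfin' := pvNext_toFinset g S0 h0 hSh k fr hfin
      have hrec := ih (k + 1) (pvNext g (g.length : Int) (pvCols g) (h0 + (k : Int)) fr)
        (by push_cast; omega) (nodup_pvNext g _ _ _ fr) hfin'
      push_cast at hrec
      rw [← add_assoc] at hrec
      exact hrec

lemma bfs_alt_eq (start_x start_y : Int) (g : List (List Int)) :
    bfs_alt start_x start_y g = pvNineCount g {(start_x, start_y)} (pvH g (start_x, start_y)) := by
  have hH : pvGetB g start_x start_y = pvH g (start_x, start_y) := rfl
  have hSh : ∀ c ∈ ({(start_x, start_y)} : Finset (Int × Int)), pvH g c = pvH g (start_x, start_y) := by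
    intro c hc
    rw [Finset.mem_singleton.mp hc]
  by_cases h9 : pvH g (start_x, start_y) ≤ 9
  · have halt := altLoop_eq g {(start_x, start_y)} (pvH g (start_x, start_y)) hSh h9
      (9 - pvH g (start_x, start_y)).toNat 0 [(start_x, start_y)] (by omega) (by simp)
      (by rw [show pvFront g {(start_x, start_y)} 0 = {(start_x, start_y)} from rfl]; simp)
    simp only [Nat.cast_zero, add_zero] at halt
    unfold pvNineCount
    rw [if_pos h9, ← halt]
    rfl
  · have h0 : (9 - pvGetB g start_x start_y).toNat = 0 := by rw [hH]; omega
    unfold pvNineCount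
    rw [if_neg h9]
    simp only [bfs_alt, h0, pvAltLoop]
    rw [if_neg (by rw [hH]; omega)]

-- Python's wrapped index: pyGet? on an in-range possibly negative index

lemma pvIdxN_lt (n : Nat) (i : Int) (h1 : -(n : Int) ≤ i) (h2 : i < n) : pvIdxN n i < n := by
  unfold pvIdxN
  split_ifs <;> omega

lemma pyGet?_inrange {α : Type} (xs : List α) (i : Int)
    (h1 : -(xs.length : Int) ≤ i) (h2 : i < xs.length) :
    PySem.List.pyGet? xs i = xs[pvIdxN xs.length i]? := by
  unfold PySem.List.pyGet? PySem.List.pyIdx? pvIdxN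
  by_cases hpos : 0 ≤ i
  · rw [if_pos hpos, if_pos (show i < (xs.length : Int) from h2), if_pos hpos]
    simp
  · rw [if_neg hpos, if_pos (show -(xs.length : Int) ≤ i from h1), if_neg hpos]
    simp

lemma pySetD_inrange {α : Type} (xs : List α) (i : Int) (v : α)
    (h1 : -(xs.length : Int) ≤ i) (h2 : i < xs.length) :
    PySem.List.pySetD xs i v = xs.set (pvIdxN xs.length i) v := by
  unfold PySem.List.pySetD PySem.List.pySet? PySem.List.pyIdx? pvIdxN
  by_cases hpos : 0 ≤ i
  · rw [if_pos hpos, if_pos (show i < (xs.length : Int) from h2), if_pos hpos]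
    simp
  · rw [if_neg hpos, if_pos (show -(xs.length : Int) ≤ i from h1), if_neg hpos]
    simp

-- under Pre_, the height Python reads at the raw (possibly negative) start equals the height
-- of the effective (wrapped) cell
lemma eff_height (g : List (List Int)) (sx sy : Int)
    (h1 : -(g.length : Int) ≤ sx) (h2 : sx < g.length)
    (h3 : -((g.headD []).length : Int) ≤ sy) (h4 : sy < ((g.headD []).length : Int))
    (hrows : ∀ row ∈ g, (g.headD []).length ≤ row.length)
    (hsy : sy < 0 → ∀ row ∈ g, row.length = (g.headD []).length) :
    pvH g (pvEff g (sx, sy)) = pvH g (sx, sy) := by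
  have hn1 : 0 < g.length := by omega
  have he1 : pvIdxN g.length sx < g.length := pvIdxN_lt _ _ h1 h2
  have hrowmem : g[pvIdxN g.length sx] ∈ g := List.getElem_mem he1
  have hrl : (g.headD []).length ≤ g[pvIdxN g.length sx].length := hrows _ hrowmem
  have houter : PySem.List.pyGet? g sx = some g[pvIdxN g.length sx] := by
    rw [pyGet?_inrange g sx h1 h2]
    exact List.getElem?_eq_getElem he1
  have houter' : PySem.List.pyGet? g ((pvIdxN g.length sx : Nat) : Int) = some g[pvIdxN g.length sx] := by
    rw [PySem.List.pyGet?_of_nonneg _ (by positivity)]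
    rw [Int.toNat_natCast]
    exact List.getElem?_eq_getElem he1
  unfold pvH pvGetA pvEff
  dsimp only
  rw [houter, houter']
  simp only [Option.bind_some]
  congr 1
  by_cases hy0 : 0 ≤ sy
  · have hylt : sy.toNat < g[pvIdxN g.length sx].length := by omega
    rw [PySem.List.pyGet?_of_nonneg _ hy0, PySem.List.pyGet?_of_nonneg _ (by positivity)]
    rw [Int.toNat_natCast]
    unfold pvIdxN
    rw [if_pos hy0]
  · have hrleq : g[pvIdxN g.length sx].length = (g.headD []).length :=
      hsy (by omega) _ hrowmem
    rw [pyGet?_inrange _ sy (by omega) (by omega)]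
    rw [PySem.List.pyGet?_of_nonneg _ (by positivity)]
    rw [Int.toNat_natCast, hrleq]

-- marking visited[start_x][start_y] = True on the fresh matrix marks exactly the wrapped cell
lemma mark_init (g : List (List Int)) (sx sy : Int)
    (h1 : -(g.length : Int) ≤ sx) (h2 : sx < g.length)
    (h3 : -((g.headD []).length : Int) ≤ sy) (h4 : sy < ((g.headD []).length : Int)) :
    pvShape g (pvVisSet (List.replicate g.length (List.replicate (g.headD []).length false)) sx sy) ∧
    pvVisF g (pvVisSet (List.replicate g.length (List.replicate (g.headD []).length false)) sx sy)
      = {pvEff g (sx, sy)} := by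
  have he1 : pvIdxN g.length sx < g.length := pvIdxN_lt _ _ h1 h2
  have he2 : pvIdxN (g.headD []).length sy < (g.headD []).length := pvIdxN_lt _ _ h3 h4
  have hget : PySem.List.pyGet? (List.replicate g.length (List.replicate (g.headD []).length false)) sx
      = some (List.replicate (g.headD []).length false) := by
    rw [pyGet?_inrange _ sx (by simpa using h1) (by simpa using h2)]
    simp only [List.length_replicate]
    rw [List.getElem?_eq_getElem (by simpa using he1)]
    simp
  have hmark : pvVisSet (List.replicate g.length (List.replicate (g.headD []).length false)) sx sy
      = (List.replicate g.length (List.replicate (g.headD []).length false)).set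
          (pvIdxN g.length sx)
          ((List.replicate (g.headD []).length false).set (pvIdxN (g.headD []).length sy) true) := by
    unfold pvVisSet
    rw [hget]
    simp only [Option.getD_some]
    rw [pySetD_inrange _ sy true (by simpa using h3) (by simpa using h4),
      pySetD_inrange _ sx _ (by simpa using h1) (by simpa using h2)]
    simp
  rw [hmark]
  constructor
  · constructor
    · simp
    · intro r hr
      rcases List.mem_or_eq_of_mem_set hr with hmem | rfl
      · rw [List.eq_of_mem_replicate hmem]
        simp
      · simp
  · ext c
    obtain ⟨a, b⟩ := c
    rw [mem_pvVisF, Finset.mem_singleton]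
    constructor
    · rintro ⟨hab, hv⟩
      obtain ⟨ha0, ha1, hb0, hb1⟩ := (inB_iff g (a, b)).mp hab
      dsimp only at ha0 ha1 hb0 hb1
      unfold pvVisGet at hv
      rw [PySem.List.pyGet?_of_nonneg _ ha0] at hv
      rw [List.getElem?_set] at hv
      by_cases hax : pvIdxN g.length sx = a.toNat
      · rw [if_pos hax, if_pos (by simp only [List.length_replicate]; exact he1)] at hv
        simp only [Option.bind_some] at hv
        rw [PySem.List.pyGet?_of_nonneg _ hb0, List.getElem?_set] at hv
        by_cases hby : pvIdxN (g.headD []).length sy = b.toNat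
        · unfold pvEff
          rw [Prod.ext_iff]
          refine ⟨?_, ?_⟩
          · dsimp only
            omega
          · dsimp only
            omega
        · exfalso
          rw [if_neg hby,
            List.getElem?_eq_getElem (by simp only [List.length_replicate]; omega)] at hv
          rw [List.getElem_replicate] at hv
          simp at hv
      · exfalso
        rw [if_neg hax,
          List.getElem?_eq_getElem (by simp only [List.length_replicate]; omega)] at hv
        rw [List.getElem_replicate] at hv
        simp only [Option.bind_some] at hv
        rw [PySem.List.pyGet?_of_nonneg _ hb0,
          List.getElem?_eq_getElem (by simp only [List.length_replicate]; omega)] at hv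
        rw [List.getElem_replicate] at hv
        simp at hv
    · intro hab
      have ha := congrArg Prod.fst hab
      have hb := congrArg Prod.snd hab
      dsimp only [pvEff] at ha hb
      subst ha
      subst hb
      refine ⟨(inB_iff g _).mpr ⟨Int.natCast_nonneg _, by dsimp only; exact_mod_cast he1,
        Int.natCast_nonneg _, by dsimp only; exact_mod_cast he2⟩, ?_⟩
      unfold pvVisGet
      rw [PySem.List.pyGet?_of_nonneg _ (Int.natCast_nonneg _)]
      rw [Int.toNat_natCast, List.getElem?_set, if_pos rfl,
        if_pos (by simp only [List.length_replicate]; exact he1)]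
      simp only [Option.bind_some]
      rw [PySem.List.pyGet?_of_nonneg _ (Int.natCast_nonneg _)]
      rw [Int.toNat_natCast, List.getElem?_set, if_pos rfl,
        if_pos (by simp only [List.length_replicate]; exact he2)]
      rfl

lemma bfs_eq (start_x start_y : Int) (g : List (List Int))
    (h1 : -(g.length : Int) ≤ start_x) (h2 : start_x < g.length)
    (h3 : -((g.headD []).length : Int) ≤ start_y) (h4 : start_y < ((g.headD []).length : Int))
    (hrows : ∀ row ∈ g, (g.headD []).length ≤ row.length)
    (hsy : start_y < 0 → ∀ row ∈ g, row.length = (g.headD []).length) :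
    bfs start_x start_y g = pvNineCount g {(start_x, start_y)} (pvH g (start_x, start_y)) := by
  obtain ⟨hsh1, hvf1⟩ := mark_init g start_x start_y h1 h2 h3 h4
  have heff : pvH g (pvEff g (start_x, start_y)) = pvH g (start_x, start_y) :=
    eff_height g start_x start_y h1 h2 h3 h4 hrows hsy
  have heffbox : pvEff g (start_x, start_y) ∈ pvBox g := by
    have : pvEff g (start_x, start_y) ∈ pvVisF g _ := hvf1 ▸ Finset.mem_singleton_self _
    exact Finset.mem_of_mem_filter _ this
  show pvBfsLoop g (g.length : Int) (pvCols g) (g.length * (g.headD []).length + 1)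
      [(start_x, start_y)]
      (pvVisSet (List.replicate g.length (List.replicate (g.headD []).length false)) start_x start_y)
      0 = pvNineCount g {(start_x, start_y)} (pvH g (start_x, start_y))
  simp only [pvBfsLoop]
  obtain ⟨l, vis2, heq, hsh2, hndl, hprop, hvf2, hcov⟩ :=
    foldA_spec g start_x start_y [((-1 : Int), (0 : Int)), (1, 0), (0, -1), (0, 1)]
      (fun e he => he)
      (pvVisSet (List.replicate g.length (List.replicate (g.headD []).length false)) start_x start_y)
      [] hsh1
  rw [heq]
  simp only [List.nil_append]
  have hdisj : ∀ e ∈ l, e ∉ pvVisF g (pvVisSet (List.replicate g.length (List.replicate (g.headD []).length false)) start_x start_y) :=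
    fun e he => (hprop e he).1
  have heffl : pvEff g (start_x, start_y) ∉ l := by
    intro h
    exact hdisj _ h (hvf1 ▸ Finset.mem_singleton_self _)
  have hvf2' : pvVisF g vis2 = insert (pvEff g (start_x, start_y)) l.toFinset := by
    rw [hvf2, hvf1, Finset.singleton_union]
  have hSh : ∀ c ∈ ({(start_x, start_y)} : Finset (Int × Int)), pvH g c = pvH g (start_x, start_y) := by
    intro c hc
    rw [Finset.mem_singleton.mp hc]
  have hEh : ∀ c ∈ ({pvEff g (start_x, start_y)} : Finset (Int × Int)), pvH g c = pvH g (start_x, start_y) := by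
    intro c hc
    rw [Finset.mem_singleton.mp hc]
    exact heff
  have hlF : ∀ e ∈ l, e ∈ pvFront g {(start_x, start_y)} 1 := by
    intro e he
    have hstep := (hprop e he).2
    refine (front_succ_mem g _ 0 e).mpr ⟨?_, ⟨(start_x, start_y), Finset.mem_singleton_self _, hstep⟩⟩
    exact (mem_pvBox g e).mpr ((stepB_iff g _ _).mp hstep).1
  apply bfsLoop_eq g {(start_x, start_y)} {pvEff g (start_x, start_y)}
    (pvH g (start_x, start_y)) hSh hEh (by simp)
  · exact hsh2
  · exact hndl
  · intro e he
    rw [hvf2']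
    exact Finset.mem_insert_of_mem (List.mem_toFinset.mpr he)
  · intro e he
    exact ⟨1, le_refl 1, hlF e he⟩
  · intro e he
    rw [hvf2'] at he
    rcases Finset.mem_insert.mp he with rfl | h
    · exact Or.inl (Finset.mem_singleton_self _)
    · exact Or.inr ⟨1, le_refl 1, hlF e (List.mem_toFinset.mp h)⟩
  · intro e he
    rw [front_succ_mem] at he
    obtain ⟨-, p, hp, hstep⟩ := he
    rw [show pvFront g {(start_x, start_y)} 0 = {(start_x, start_y)} from rfl] at hp
    rw [Finset.mem_singleton.mp hp] at hstep
    rw [stepB_iff] at hstep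
    obtain ⟨heB, hdm, hh⟩ := hstep
    have he' : e = (start_x + (e.1 - start_x), start_y + (e.2 - start_y)) := by
      cases e
      simp
    have hst2 : pvStepB g (start_x, start_y) (start_x + (e.1 - start_x), start_y + (e.2 - start_y)) = true := by
      rw [← he', stepB_iff]
      exact ⟨heB, hdm, hh⟩
    have := hcov (e.1 - start_x, e.2 - start_y) hdm hst2
    rw [← he'] at this
    exact this
  · intro p hpV hpE hpq e hst
    rw [hvf2'] at hpV
    rcases Finset.mem_insert.mp hpV with rfl | h
    · exact absurd (Finset.mem_singleton_self _) hpE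
    · exact absurd (List.mem_toFinset.mp h) hpq
  · have hsd : pvVisF g vis2 \ l.toFinset = {pvEff g (start_x, start_y)} := by
      rw [hvf2']
      ext e
      simp only [Finset.mem_sdiff, Finset.mem_insert, Finset.mem_singleton, List.mem_toFinset]
      constructor
      · rintro ⟨rfl | h, hne⟩
        · rfl
        · exact absurd h hne
      · rintro rfl
        exact ⟨Or.inl rfl, heffl⟩
    rw [hsd]
    rw [Finset.filter_singleton]
    by_cases h9 : pvH g (pvEff g (start_x, start_y)) = 9
    · rw [if_pos h9]
      rw [if_pos (by rw [show pvGetA g start_x start_y = pvH g (start_x, start_y) from rfl, ← heff]; exact h9)]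
      simp
    · rw [if_neg h9]
      rw [if_neg (by rw [show pvGetA g start_x start_y = pvH g (start_x, start_y) from rfl, ← heff]; exact h9)]
      simp
  · intro e he
    rw [Finset.mem_singleton.mp he, hvf2']
    exact Finset.mem_insert_self _ _
  · have hcard2 : (pvVisF g vis2).card = 1 + l.length := by
      rw [hvf2', Finset.card_insert_of_notMem (fun h => heffl (List.mem_toFinset.mp h)),
        List.toFinset_card_of_nodup hndl]
      omega
    have hsub : (pvVisF g vis2).card ≤ (pvBox g).card :=
      Finset.card_le_card (Finset.filter_subset _ _)
    rw [box_card] at hsub ⊢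
    omega

-- ===== VERDICT (by name: the statement is the Claim_ definition above) =====
theorem bfs_spec : Claim_equal_bfs := by
  intro sx sy g _ hpre
  obtain ⟨hne, h1, h2, h3, h4, hrows, hsy⟩ := hpre
  show bfs sx sy g = bfs_alt sx sy g
  rw [bfs_eq sx sy g h1 h2 h3 h4 hrows hsy, bfs_alt_eq sx sy g]
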